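-- pv_equiv track=rewrite | github.com/lindera/mecab-jieba | scripts/evaluate.py | tokens_to_spans
-- ===== SOURCE A (Python) =====
-- def tokens_to_spans(tokens: list[str]) -> list[tuple[int, int]]:
--     """Convert a list of token surfaces to character-level (start, end) spans."""
--     spans: list[tuple[int, int]] = []
--     offset = 0
--     for token in tokens:
--         end = offset + len(token)
--         spans.append((offset, end))
--         offset = end
--     return spans
-- ===== SOURCE B (Python) =====
-- def tokens_to_spans(tokens: list[str]) -> list[tuple[int, int]]:
--     """Convert a list of token surfaces to character-level (start, end) spans."""
--     lens = [len(t) for t in tokens]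
--     ends = []
--     total = 0
--     for n in lens:
--         total += n
--         ends.append(total)
--     starts = [0] + ends[:-1]
--     return list(zip(starts, ends))
-- ===== Notes on version B (the rewrite author's own statement) =====
-- stated objective: alternative
-- what changed: Replaces the single loop that threads an offset and appends (offset, end) pairs by a prefix-sum decomposition: build the list of token lengths, form the cumulative end offsets table, derive the starts as that table shifted right by one, and zip starts with ends.
import Mathlib
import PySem

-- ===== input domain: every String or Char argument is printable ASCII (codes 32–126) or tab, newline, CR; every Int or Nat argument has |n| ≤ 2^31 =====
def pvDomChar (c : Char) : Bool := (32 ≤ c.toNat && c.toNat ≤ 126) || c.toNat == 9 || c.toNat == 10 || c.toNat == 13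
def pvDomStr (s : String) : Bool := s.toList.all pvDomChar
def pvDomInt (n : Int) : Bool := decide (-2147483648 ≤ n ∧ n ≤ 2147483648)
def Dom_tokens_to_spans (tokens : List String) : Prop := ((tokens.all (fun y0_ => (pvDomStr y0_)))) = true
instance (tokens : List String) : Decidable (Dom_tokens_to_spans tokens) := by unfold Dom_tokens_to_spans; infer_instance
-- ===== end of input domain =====

-- B replaces A's offset-threading loop by a prefix-sum table of end offsets zipped with its
-- right-shifted copy as the starts (alternative decomposition, same cost).

-- ===== PORT A =====
-- literal transliteration of A: fold over tokens with state (spans, offset)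
def tokens_to_spans (tokens : List String) : List (Int × Int) :=
  (tokens.foldl
    (fun (st : List (Int × Int) × Int) token =>
      let e := st.2 + (PySem.Str.len token : Int)
      (st.1 ++ [(st.2, e)], e))
    ([], 0)).1

-- ===== PORT B =====
-- B's accumulation loop building the cumulative-end table `ends`
def pvEndsB : List Int → Int → List Int
  | [], _ => []
  | n :: rest, total => (total + n) :: pvEndsB rest (total + n)

def tokens_to_spans_alt (tokens : List String) : List (Int × Int) :=
  let lens := tokens.map (fun t => ((PySem.Str.len t : Int)))
  let ends := pvEndsB lens 0
  let starts := (0 : Int) :: ends.dropLast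
  starts.zip ends

-- ===== PRECONDITION & SPEC =====
def Spec_tokens_to_spans (tokens : List String) (out : List (Int × Int)) : Prop := out = tokens_to_spans_alt tokens
instance (tokens : List String) (out : List (Int × Int)) : Decidable (Spec_tokens_to_spans tokens out) := by unfold Spec_tokens_to_spans; infer_instance

-- ===== CLAIM (what is proved, stated in full; the proofs are below) =====
def Claim_equal_tokens_to_spans : Prop := ∀ (tokens : List String), Dom_tokens_to_spans tokens → Spec_tokens_to_spans tokens (tokens_to_spans tokens)

-- ===== LEMMAS AND PROOFS =====

-- reference spans sequence starting at offset `s`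
def pvGo : List String → Int → List (Int × Int)
  | [], _ => []
  | t :: r, s => (s, s + (PySem.Str.len t : Int)) :: pvGo r (s + (PySem.Str.len t : Int))

theorem pvA_go (tokens : List String) (acc : List (Int × Int)) (s : Int) :
    (tokens.foldl
      (fun (st : List (Int × Int) × Int) token =>
        let e := st.2 + (PySem.Str.len token : Int)
        (st.1 ++ [(st.2, e)], e))
      (acc, s)).1 = acc ++ pvGo tokens s := by
  induction tokens generalizing acc s with
  | nil => simp [pvGo]
  | cons t r ih =>
    simp only [List.foldl, pvGo]
    have h := ih (acc ++ [(s, s + (PySem.Str.len t : Int))]) (s + (PySem.Str.len t : Int))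
    simp only [List.append_assoc, List.singleton_append] at h
    exact h

theorem pvB_go' (lens : List String) (s : Int) :
    (s :: (pvEndsB (lens.map (fun t => ((PySem.Str.len t : Int)))) s).dropLast).zip
        (pvEndsB (lens.map (fun t => ((PySem.Str.len t : Int)))) s)
      = pvGo lens s := by
  induction lens generalizing s with
  | nil => simp [pvEndsB, pvGo]
  | cons t r ih =>
    simp only [List.map, pvEndsB, pvGo]
    cases h : pvEndsB (r.map (fun t => ((PySem.Str.len t : Int)))) (s + (PySem.Str.len t : Int)) with
    | nil =>
      have := ih (s + (PySem.Str.len t : Int))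
      rw [h] at this
      simpa [h] using this
    | cons e es =>
      have := ih (s + (PySem.Str.len t : Int))
      rw [h] at this
      simpa [h, List.dropLast] using this

-- ===== VERDICT (by name: the statement is the Claim_ definition above) =====
theorem tokens_to_spans_spec : Claim_equal_tokens_to_spans := by
  intro tokens _
  unfold Spec_tokens_to_spans tokens_to_spans tokens_to_spans_alt
  rw [pvA_go tokens [] 0]
  simpa using (pvB_go' tokens 0).symm
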